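-- pv_equiv track=rewrite | github.com/sagnikpal10/Modified-Serpent-Cipher | simpleServer.py | bitstring
-- ===== SOURCE A (Python) =====
-- def bitstring(n, minlen=1):
--     """Translate n from integer to bitstring, padding it with 0s as
--     necessary to reach the minimum length 'minlen'. 'n' must be >= 0 since
--     the bitstring format is undefined for negative integers.
--     EXAMPLE: bitstring(10, 8) -> "01010000"
--     """
--     result = ""
--     while n > 0:
--         if n & 1:
--             result = result + "1"
--         else:
--             result = result + "0"
--         n = n >> 1
--     if len(result) < minlen:
--         result = result + "0" * (minlen - len(result))
--     return result
-- ===== SOURCE B (Python) =====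
-- def bitstring(n, minlen=1):
--     # closed-form conversion: big-endian binary via format, reversed to little-endian
--     core = format(n, "b")[::-1] if n > 0 else ""
--     if len(core) < minlen:
--         core = core + "0" * (minlen - len(core))
--     return core
-- ===== Notes on version B (the rewrite author's own statement) =====
-- stated objective: idiomatic
-- what changed: Replaces the bit-by-bit shift/mask accumulation loop with a closed-form library conversion format(n,'b') reversed by a slice, keeping the same padding step.
import Mathlib
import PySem

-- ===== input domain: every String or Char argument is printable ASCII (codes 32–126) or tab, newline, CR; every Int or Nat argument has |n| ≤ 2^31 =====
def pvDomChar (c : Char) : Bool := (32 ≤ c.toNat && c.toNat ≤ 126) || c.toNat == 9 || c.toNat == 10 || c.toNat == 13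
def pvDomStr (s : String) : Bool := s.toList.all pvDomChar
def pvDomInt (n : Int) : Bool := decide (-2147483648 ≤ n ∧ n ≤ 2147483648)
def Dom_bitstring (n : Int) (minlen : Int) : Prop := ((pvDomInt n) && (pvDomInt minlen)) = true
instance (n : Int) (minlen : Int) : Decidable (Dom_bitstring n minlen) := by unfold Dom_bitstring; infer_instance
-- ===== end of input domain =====

-- B replaces A's bit-by-bit shift/mask loop with a closed-form binary conversion
-- (big-endian digits, reversed) followed by the same padding step; objective: idiomatic.


-- ===== PORT A =====
-- n >> 1 (Python arithmetic shift) equals floor division by 2; used for termination.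
theorem pvShiftRight_one (n : Int) : n >>> (1 : Nat) = n / 2 := by
  rw [Int.shiftRight_eq_div_pow]; norm_num

-- the 'while n > 0' loop of A, accumulating 'result' (as its list of characters)
def bsLoop (n : Int) (result : List Char) : List Char :=
  if 0 < n then
    bsLoop (n >>> (1 : Nat)) (result ++ [if PySem.Int.band n 1 ≠ 0 then '1' else '0'])
  else result
termination_by n.toNat
decreasing_by simp only [pvShiftRight_one]; omega

def bitstring (n : Int) (minlen : Int) : String :=
  let result := bsLoop n []
  String.ofList (if (result.length : Int) < minlen then
    result ++ List.replicate (minlen - (result.length : Int)).toNat '0'  -- "0" * k, empty for k ≤ 0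
  else result)

-- ===== PORT B =====
-- format(n, 'b') for n > 0: big-endian binary digits (hand port of the library conversion, exact for n > 0)
def binBE (n : Nat) : List Char :=
  if n = 0 then [] else binBE (n / 2) ++ [if n % 2 = 1 then '1' else '0']
decreasing_by omega

def bitstring_alt (n : Int) (minlen : Int) : String :=
  let core := if 0 < n then (binBE n.toNat).reverse else []   -- [::-1] = reverse
  String.ofList (if (core.length : Int) < minlen then
    core ++ List.replicate (minlen - (core.length : Int)).toNat '0'
  else core)

-- ===== PRECONDITION & SPEC =====
def Spec_bitstring (n : Int) (minlen : Int) (out : String) : Prop := out = bitstring_alt n minlen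
instance (n : Int) (minlen : Int) (out : String) : Decidable (Spec_bitstring n minlen out) := by unfold Spec_bitstring; infer_instance

-- ===== CLAIM (what is proved, stated in full; the proofs are below) =====
def Claim_equal_bitstring : Prop := ∀ (n : Int) (minlen : Int), Dom_bitstring n minlen → Spec_bitstring n minlen (bitstring n minlen)

-- ===== LEMMAS AND PROOFS =====
theorem binBE_zero : binBE 0 = [] := by rw [binBE]; simp

-- loop invariant: A's loop produces the reversed big-endian digits appended to the accumulator
theorem bsLoop_eq (n : Int) (r : List Char) :
    bsLoop n r = r ++ (binBE n.toNat).reverse := by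
  fun_induction bsLoop n r with
  | case1 n r h ih =>
    have hs : (n >>> (1 : Nat)).toNat = n.toNat / 2 := by
      rw [pvShiftRight_one]; omega
    have hb1 : PySem.Int.band n 1 = n % 2 := by
      rw [PySem.Int.band_one]
      simp only [PySem.Int.mod]
      rw [Int.fmod_eq_emod_of_nonneg _ (by omega)]
    have hb : (PySem.Int.band n 1 ≠ 0) ↔ (n.toNat % 2 = 1) := by
      rw [hb1]; omega
    have hnz : n.toNat ≠ 0 := by omega
    have hstep : binBE n.toNat = binBE (n.toNat / 2) ++ [if n.toNat % 2 = 1 then '1' else '0'] := by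
      rw [binBE, if_neg hnz]
    simp only [dite_eq_ite] at ih
    rw [ih, hs, hstep, List.reverse_append]
    simp [hb, List.append_assoc]
  | case2 n r h =>
    have : n.toNat = 0 := by omega
    rw [this, binBE_zero]; simp

theorem bitstring_eq_alt (n minlen : Int) : bitstring n minlen = bitstring_alt n minlen := by
  unfold bitstring bitstring_alt
  have hcore : bsLoop n [] = (if 0 < n then (binBE n.toNat).reverse else []) := by
    rw [bsLoop_eq]
    by_cases h : 0 < n
    · simp [h]
    · have : n.toNat = 0 := by omega
      simp [h, this, binBE_zero]
  rw [hcore]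

-- ===== VERDICT (by name: the statement is the Claim_ definition above) =====
theorem bitstring_spec : Claim_equal_bitstring := by
  intro n minlen _
  unfold Spec_bitstring
  exact bitstring_eq_alt n minlen
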